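-- pv_equiv track=rewrite | github.com/Matcha31/Graphs | THEG_Theorie_des_Graphes/2Exos/is_eulerian.py | is_edge_connected
-- ===== SOURCE A (Python) =====
-- def is_edge_connected(n, edges):
--     successors = [[] for a in range(n)]
--     for (a, b) in edges:
--         successors[a].append(b)
--         successors[b].append(a)
--     visited = [False] * n
--     visited[edges[0][0]] = True
--     to_visit = [edges[0][0]]
--     while to_visit:
--         current = to_visit.pop()
--         for neighboor in successors[current]:
--             if not visited[neighboor]:
--                 visited[neighboor] = True
--                 to_visit.append(neighboor)
--     return all(visited[a] or not successors[a] for a in range(n))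
-- ===== SOURCE B (Python) =====
-- def is_edge_connected(n, edges):
--     # Label propagation instead of DFS: no adjacency lists, no stack.  A boolean
--     # component table seeded at edges[0][0] is saturated by repeated passes over
--     # the raw edge list until a fixpoint, then every edge endpoint is checked.
--     comp = [False] * n
--     comp[edges[0][0]] = True
--     changed = True
--     while changed:
--         changed = False
--         for a, b in edges:
--             if comp[a] != comp[b]:
--                 comp[a] = comp[b] = True
--                 changed = True
--     return all(comp[a] and comp[b] for a, b in edges)
-- ===== Notes on version B (the rewrite author's own statement) =====
-- stated objective: alternative
-- what changed: Replaces the adjacency-list + explicit-stack DFS and the visited[] scan over range(n) by label propagation: a boolean component table seeded at edges[0][0] is saturated by repeated passes over the raw edge list until a fixpoint, and the final check walks the edges instead of the vertices.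
import Mathlib
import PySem

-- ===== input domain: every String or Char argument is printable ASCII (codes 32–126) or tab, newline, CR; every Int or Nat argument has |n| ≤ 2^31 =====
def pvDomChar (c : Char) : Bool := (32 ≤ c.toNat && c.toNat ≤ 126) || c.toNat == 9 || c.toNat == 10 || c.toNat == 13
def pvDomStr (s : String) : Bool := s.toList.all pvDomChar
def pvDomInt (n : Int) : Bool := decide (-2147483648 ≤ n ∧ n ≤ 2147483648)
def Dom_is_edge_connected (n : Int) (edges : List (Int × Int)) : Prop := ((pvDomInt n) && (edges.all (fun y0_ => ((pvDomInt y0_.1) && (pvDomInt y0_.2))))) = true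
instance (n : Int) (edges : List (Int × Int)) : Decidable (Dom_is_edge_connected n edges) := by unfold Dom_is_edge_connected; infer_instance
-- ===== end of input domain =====

-- B replaces A's adjacency-list + stack DFS by label propagation over the raw edge
-- list (a boolean component table saturated to a fixpoint); alternative decomposition,
-- not claimed faster.

-- ===== PORT A =====
-- successors[x] lookup (Python list indexing: negative indices count from the end)
def pvGetLL (xs : List (List Int)) (i : Int) : List Int := PySem.List.pyGetD xs i []
-- visited[x] / comp[x] lookup (same Python list-indexing rule)
def pvGetB (xs : List Bool) (i : Int) : Bool := PySem.List.pyGetD xs i false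

-- the 'for (a, b) in edges' loop building 'successors'
def pvBuildSucc (n : Int) (edges : List (Int × Int)) : List (List Int) :=
  edges.foldl
    (fun succ e =>
      let succ := PySem.List.pySetD succ e.1 (pvGetLL succ e.1 ++ [e.2])
      PySem.List.pySetD succ e.2 (pvGetLL succ e.2 ++ [e.1]))
    ((PySem.List.pyRange 0 n 1).map (fun _ => []))

-- the 'while to_visit' loop; to_visit.pop() takes the LAST element; fuel is only a
-- totality guard (2*n+2 steps always suffice: each pushed vertex flips one False).
def pvDfs (succ : List (List Int)) : List Bool → List Int → Nat → List Bool
  | visited, _, 0 => visited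
  | visited, toVisit, fuel+1 =>
    match toVisit.getLast? with
    | none => visited
    | some current =>
      let st := (pvGetLL succ current).foldl
        (fun (st : List Bool × List Int) nb =>
          if pvGetB st.1 nb = false then
            (PySem.List.pySetD st.1 nb true, st.2 ++ [nb])
          else st)
        (visited, toVisit.dropLast)
      pvDfs succ st.1 st.2 fuel

def is_edge_connected (n : Int) (edges : List (Int × Int)) : Bool :=
  let succ := pvBuildSucc n edges
  match PySem.List.pyGet? edges 0 with
  | none => false     -- edges[0] raises IndexError: outside Pre_
  | some e0 =>
    let visited := PySem.List.pySetD (List.replicate n.toNat false) e0.1 true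
    let visited := pvDfs succ visited [e0.1] (2 * n.toNat + 2)
    (PySem.List.pyRange 0 n 1).all (fun a => pvGetB visited a || decide (pvGetLL succ a = []))

-- ===== PORT B =====
-- one 'for a, b in edges' pass of the propagation loop
def pvPassB (edges : List (Int × Int)) (st : List Bool × Bool) : List Bool × Bool :=
  edges.foldl
    (fun st e =>
      if (pvGetB st.1 e.1 != pvGetB st.1 e.2) = true then
        (PySem.List.pySetD (PySem.List.pySetD st.1 e.1 true) e.2 true, true)
      else st)
    st

-- the 'while changed' loop; fuel is only a totality guard (each changed pass flips
-- at least one False entry of the n-entry table, so n+2 passes always suffice).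
def pvSatB (edges : List (Int × Int)) : List Bool → Nat → List Bool
  | comp, 0 => comp
  | comp, fuel+1 =>
    let st := pvPassB edges (comp, false)
    if st.2 then pvSatB edges st.1 fuel else st.1

def is_edge_connected_alt (n : Int) (edges : List (Int × Int)) : Bool :=
  match PySem.List.pyGet? edges 0 with
  | none => false     -- comp[edges[0][0]] raises IndexError: outside Pre_
  | some e0 =>
    let comp := PySem.List.pySetD (List.replicate n.toNat false) e0.1 true
    let comp := pvSatB edges comp (n.toNat + 2)
    edges.all (fun e => pvGetB comp e.1 && pvGetB comp e.2)

-- ===== PRECONDITION & SPEC =====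
-- Pre_ excludes exactly the inputs where the Python raises IndexError: an empty edge
-- list (edges[0]) or an edge endpoint outside [-n, n) (adjacency/visited indexing).
def Pre_is_edge_connected (n : Int) (edges : List (Int × Int)) : Prop :=
  edges ≠ [] ∧ ∀ e ∈ edges, -n ≤ e.1 ∧ e.1 < n ∧ -n ≤ e.2 ∧ e.2 < n

instance (n : Int) (edges : List (Int × Int)) : Decidable (Pre_is_edge_connected n edges) := by
  unfold Pre_is_edge_connected; infer_instance

def pvWitness_is_edge_connected : Int × (List (Int × Int)) := (3, [(0, 1), (2, -1)])

def Spec_is_edge_connected (n : Int) (edges : List (Int × Int)) (out : Bool) : Prop :=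
  out = is_edge_connected_alt n edges
instance (n : Int) (edges : List (Int × Int)) (out : Bool) : Decidable (Spec_is_edge_connected n edges out) := by
  unfold Spec_is_edge_connected; infer_instance

-- ===== CLAIM (what is proved, stated in full; the proofs are below) =====
def Claim_equal_is_edge_connected : Prop := ∀ (n : Int) (edges : List (Int × Int)), Dom_is_edge_connected n edges → Pre_is_edge_connected n edges → Spec_is_edge_connected n edges (is_edge_connected n edges)

-- ===== LEMMAS AND PROOFS =====

-- the slot of a (possibly negative) Python index into a list of length len
def pvW (len : Nat) (i : Int) : Int := if i < 0 then i + len else i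

-- x is a legal Python index for a list of length n
def pvInW (n x : Int) : Prop := -n ≤ x ∧ x < n

-- slot k has the raw label y as a neighbour
def pvAdjS (n : Int) (edges : List (Int × Int)) (k y : Int) : Prop :=
  ∃ e ∈ edges, (pvW n.toNat e.1 = k ∧ e.2 = y) ∨ (pvW n.toNat e.2 = k ∧ e.1 = y)

-- slots k and l are joined by some edge
def pvAdjW (n : Int) (edges : List (Int × Int)) (k l : Int) : Prop :=
  ∃ e ∈ edges, (pvW n.toNat e.1 = k ∧ pvW n.toNat e.2 = l) ∨
    (pvW n.toNat e.2 = k ∧ pvW n.toNat e.1 = l)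

-- slot k is an endpoint slot of some edge
def pvTouchW (n : Int) (edges : List (Int × Int)) (k : Int) : Prop :=
  ∃ e ∈ edges, pvW n.toNat e.1 = k ∨ pvW n.toNat e.2 = k

-- slot reachability from the seed's slot
def pvReachW (n : Int) (edges : List (Int × Int)) (s k : Int) : Prop :=
  Relation.ReflTransGen (pvAdjW n edges) (pvW n.toNat s) k

theorem pvW_range (n x : Int) (h : pvInW n x) : 0 ≤ pvW n.toNat x ∧ pvW n.toNat x < n := by
  rcases h with ⟨h1, h2⟩
  unfold pvW
  split <;> omega

theorem pvAdjS_cons (n : Int) (e : Int × Int) (es : List (Int × Int)) (k y : Int) :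
    pvAdjS n (e :: es) k y ↔
      ((pvW n.toNat e.1 = k ∧ e.2 = y) ∨ (pvW n.toNat e.2 = k ∧ e.1 = y)) ∨ pvAdjS n es k y := by
  simp [pvAdjS, or_assoc]

theorem pvAdjW_symm {n : Int} {es : List (Int × Int)} {k l : Int}
    (h : pvAdjW n es k l) : pvAdjW n es l k := by
  obtain ⟨e, he, h | h⟩ := h
  · exact ⟨e, he, Or.inr ⟨h.2, h.1⟩⟩
  · exact ⟨e, he, Or.inl ⟨h.2, h.1⟩⟩

theorem pvAdjS_range (n : Int) (edges : List (Int × Int))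
    (hE : ∀ e ∈ edges, pvInW n e.1 ∧ pvInW n e.2) {k y : Int}
    (h : pvAdjS n edges k y) : pvInW n y := by
  obtain ⟨e, he, h | h⟩ := h
  · exact h.2 ▸ (hE e he).2
  · exact h.2 ▸ (hE e he).1

theorem pvAdjW_rangeL (n : Int) (edges : List (Int × Int))
    (hE : ∀ e ∈ edges, pvInW n e.1 ∧ pvInW n e.2) {k l : Int}
    (h : pvAdjW n edges k l) : 0 ≤ l ∧ l < n := by
  obtain ⟨e, he, h | h⟩ := h
  · exact h.2 ▸ pvW_range n e.2 (hE e he).2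
  · exact h.2 ▸ pvW_range n e.1 (hE e he).1

theorem pvAdjS_to_W {n : Int} {edges : List (Int × Int)} {k y : Int}
    (h : pvAdjS n edges k y) : pvAdjW n edges k (pvW n.toNat y) := by
  obtain ⟨e, he, h | h⟩ := h
  · exact ⟨e, he, Or.inl ⟨h.1, by rw [h.2]⟩⟩
  · exact ⟨e, he, Or.inr ⟨h.1, by rw [h.2]⟩⟩

theorem pvAdjW_to_S {n : Int} {edges : List (Int × Int)} {k l : Int}
    (h : pvAdjW n edges k l) : ∃ y, pvAdjS n edges k y ∧ pvW n.toNat y = l := by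
  obtain ⟨e, he, h | h⟩ := h
  · exact ⟨e.2, ⟨e, he, Or.inl ⟨h.1, rfl⟩⟩, h.2⟩
  · exact ⟨e.1, ⟨e, he, Or.inr ⟨h.1, rfl⟩⟩, h.2⟩

theorem pvTouchW_iff_adjS (n : Int) (edges : List (Int × Int)) (k : Int) :
    pvTouchW n edges k ↔ ∃ y, pvAdjS n edges k y := by
  constructor
  · rintro ⟨e, he, h | h⟩
    · exact ⟨e.2, e, he, Or.inl ⟨h, rfl⟩⟩
    · exact ⟨e.1, e, he, Or.inr ⟨h, rfl⟩⟩
  · rintro ⟨y, e, he, h | h⟩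
    · exact ⟨e, he, Or.inl h.1⟩
    · exact ⟨e, he, Or.inr h.1⟩

-- wrapping a legal index does not change which element Python addresses
theorem pv_idx_wrap (len : Nat) (i : Int) (h : -(len : Int) ≤ i) :
    PySem.List.pyIdx? len i = PySem.List.pyIdx? len (pvW len i) := by
  unfold pvW PySem.List.pyIdx?
  split_ifs <;> first | rfl | (congr 1; omega)

theorem pv_getD_wrap {α : Type} (xs : List α) (i : Int) (d : α)
    (h : -(xs.length : Int) ≤ i) :
    PySem.List.pyGetD xs i d = PySem.List.pyGetD xs (pvW xs.length i) d := by
  unfold PySem.List.pyGetD PySem.List.pyGet?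
  rw [pv_idx_wrap xs.length i h]

theorem pv_setD_wrap {α : Type} (xs : List α) (i : Int) (v : α)
    (h : -(xs.length : Int) ≤ i) :
    PySem.List.pySetD xs i v = PySem.List.pySetD xs (pvW xs.length i) v := by
  unfold PySem.List.pySetD PySem.List.pySet?
  rw [pv_idx_wrap xs.length i h]

-- indexed read after indexed write, both for nonnegative indices
theorem pv_getD_setD {α : Type} (xs : List α) (i j : Int) (v d : α)
    (hi0 : 0 ≤ i) (hil : i < (xs.length : Int)) (hj0 : 0 ≤ j) :
    PySem.List.pyGetD (PySem.List.pySetD xs i v) j d =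
      if j = i then v else PySem.List.pyGetD xs j d := by
  rw [PySem.List.pySetD_of_nonneg xs v hi0]
  by_cases hjl : j < (xs.length : Int)
  · rw [PySem.List.pyGetD_eq_getElem _ d hj0 (by simpa using hjl),
        PySem.List.pyGetD_eq_getElem _ d hj0 hjl]
    rw [List.getElem_set]
    split_ifs with h1 h2 h2 <;> first | rfl | (exfalso; omega)
  · have h1 : PySem.List.pyGet? (xs.set i.toNat v) j = none := by
      rw [PySem.List.pyGet?_eq_none_iff]
      simp only [PySem.Raise.InRange, List.length_set]; omega
    have h2 : PySem.List.pyGet? xs j = none := by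
      rw [PySem.List.pyGet?_eq_none_iff]
      simp only [PySem.Raise.InRange]; omega
    rw [PySem.List.pyGetD_of_none _ _ _ h1, PySem.List.pyGetD_of_none _ _ _ h2]
    rw [if_neg (by omega)]

-- the same, when the write index is a possibly-negative legal Python index
theorem pv_getD_setD_w {α : Type} (xs : List α) (i j : Int) (v d : α)
    (hi0 : -(xs.length : Int) ≤ i) (hil : i < (xs.length : Int)) (hj0 : 0 ≤ j) :
    PySem.List.pyGetD (PySem.List.pySetD xs i v) j d =
      if j = pvW xs.length i then v else PySem.List.pyGetD xs j d := by
  rw [pv_setD_wrap xs i v hi0]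
  have hw : 0 ≤ pvW xs.length i ∧ pvW xs.length i < (xs.length : Int) := by
    unfold pvW; split <;> omega
  exact pv_getD_setD xs (pvW xs.length i) j v d hw.1 hw.2 hj0

theorem pv_length_setD {α : Type} (xs : List α) (i : Int) (v : α) :
    (PySem.List.pySetD xs i v).length = xs.length :=
  PySem.List.length_pySetD xs i v

theorem pvGetB_replicate (k : Nat) (x : Int) : pvGetB (List.replicate k false) x = false := by
  unfold pvGetB
  by_cases h : PySem.List.pyGet? (List.replicate k false) x = none
  · rw [PySem.List.pyGetD_of_none _ _ _ h]
  · obtain ⟨b, hb⟩ := Option.ne_none_iff_exists'.mp h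
    have := PySem.List.mem_of_pyGet?_eq_some (xs := List.replicate k false) hb
    have hb' : b = false := (List.mem_replicate.mp this).2
    simp [PySem.List.pyGetD, hb, hb']

-- one False flipped to True drops the false-count by one
theorem pv_count_set : ∀ (v : List Bool) (k : Nat) (h : k < v.length), v[k]'h = false →
    (v.set k true).count false + 1 = v.count false := by
  intro v
  induction v with
  | nil => intro k h; simp at h
  | cons a v ih =>
    intro k h hf
    cases k with
    | zero => simp_all
    | succ k =>
      simp only [List.set_cons_succ, List.count_cons]
      have := ih k (by simpa using h) (by simpa using hf)
      omega

theorem pv_count_set_true : ∀ (v : List Bool) (k : Nat) (h : k < v.length), v[k]'h = true →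
    (v.set k true).count false = v.count false := by
  intro v
  induction v with
  | nil => intro k h; simp at h
  | cons a v ih =>
    intro k h hf
    cases k with
    | zero => simp_all
    | succ k =>
      simp only [List.set_cons_succ, List.count_cons]
      have := ih k (by simpa using h) (by simpa using hf)
      omega

theorem pv_count_setD (v : List Bool) (i : Int) (h0 : 0 ≤ i) (hl : i < (v.length : Int))
    (hf : pvGetB v i = false) :
    (PySem.List.pySetD v i true).count false + 1 = v.count false := by
  rw [PySem.List.pySetD_of_nonneg v true h0]
  apply pv_count_set v i.toNat (by omega)
  have := PySem.List.pyGetD_eq_getElem v false h0 hl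
  unfold pvGetB at hf
  rw [this] at hf
  exact hf

-- writing True never increases the false-count
theorem pv_count_setD_le (v : List Bool) (i : Int) :
    (PySem.List.pySetD v i true).count false ≤ v.count false := by
  by_cases hin : -(v.length : Int) ≤ i ∧ i < (v.length : Int)
  · rw [pv_setD_wrap v i true hin.1]
    have hw : 0 ≤ pvW v.length i ∧ pvW v.length i < (v.length : Int) := by
      unfold pvW; split <;> omega
    rw [PySem.List.pySetD_of_nonneg v true hw.1]
    by_cases hv : v[(pvW v.length i).toNat]'(by omega) = false
    · have := pv_count_set v (pvW v.length i).toNat (by omega) hv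
      omega
    · have := pv_count_set_true v (pvW v.length i).toNat (by omega)
        (by simpa using hv)
      omega
  · have : PySem.List.pySet? v i true = none := by
      rw [PySem.List.pySet?_eq_none_iff]
      simp only [PySem.Raise.InRange]
      omega
    unfold PySem.List.pySetD
    rw [this]
    simp

-- ===== adjacency-list construction =====

theorem pvBuild_aux (n : Int) : ∀ (es : List (Int × Int)) (acc : List (List Int))
    (P : Int → Int → Prop),
    acc.length = n.toNat →
    (∀ e ∈ es, pvInW n e.1 ∧ pvInW n e.2) →
    (∀ x y, 0 ≤ x → x < n → (y ∈ pvGetLL acc x ↔ P x y)) →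
    (es.foldl (fun succ e =>
        let succ := PySem.List.pySetD succ e.1 (pvGetLL succ e.1 ++ [e.2])
        PySem.List.pySetD succ e.2 (pvGetLL succ e.2 ++ [e.1])) acc).length = n.toNat ∧
    ∀ x y, 0 ≤ x → x < n →
      (y ∈ pvGetLL (es.foldl (fun succ e =>
        let succ := PySem.List.pySetD succ e.1 (pvGetLL succ e.1 ++ [e.2])
        PySem.List.pySetD succ e.2 (pvGetLL succ e.2 ++ [e.1])) acc) x ↔ (P x y ∨ pvAdjS n es x y)) := by
  intro es
  induction es with
  | nil =>
    intro acc P hlen _ hP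
    refine ⟨hlen, fun x y hx0 hxn => ?_⟩
    simp only [List.foldl_nil]
    rw [hP x y hx0 hxn]
    simp [pvAdjS]
  | cons e es ih =>
    intro acc P hlen hE hP
    have he12 := hE e (by simp)
    have hn : 0 < n := by rcases he12.1 with ⟨h1, h2⟩; omega
    have hcast : ((n.toNat : Int)) = n := by omega
    have hw1 := pvW_range n e.1 he12.1
    have hw2 := pvW_range n e.2 he12.2
    set w1 := pvW n.toNat e.1 with hw1def
    set w2 := pvW n.toNat e.2 with hw2def
    set acc1 := PySem.List.pySetD acc e.1 (pvGetLL acc e.1 ++ [e.2]) with hacc1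
    set acc2 := PySem.List.pySetD acc1 e.2 (pvGetLL acc1 e.2 ++ [e.1]) with hacc2
    have hlen1 : acc1.length = n.toNat := by rw [hacc1, pv_length_setD]; exact hlen
    have hlen2 : acc2.length = n.toNat := by rw [hacc2, pv_length_setD]; exact hlen1
    have hget1 : ∀ x : Int, 0 ≤ x →
        pvGetLL acc1 x = if x = w1 then pvGetLL acc e.1 ++ [e.2] else pvGetLL acc x := by
      intro x hx0
      rw [hacc1]
      have := pv_getD_setD_w acc e.1 x (pvGetLL acc e.1 ++ [e.2]) [] (by rw [hlen, hcast]; exact he12.1.1)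
        (by rw [hlen, hcast]; exact he12.1.2) hx0
      rw [hlen] at this
      exact this
    have hget2 : ∀ x : Int, 0 ≤ x →
        pvGetLL acc2 x = if x = w2 then pvGetLL acc1 e.2 ++ [e.1] else pvGetLL acc1 x := by
      intro x hx0
      rw [hacc2]
      have := pv_getD_setD_w acc1 e.2 x (pvGetLL acc1 e.2 ++ [e.1]) [] (by rw [hlen1, hcast]; exact he12.2.1)
        (by rw [hlen1, hcast]; exact he12.2.2) hx0
      rw [hlen1] at this
      exact this
    have hraw1 : pvGetLL acc e.1 = pvGetLL acc w1 := by
      unfold pvGetLL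
      have := pv_getD_wrap acc e.1 ([] : List Int) (by rw [hlen, hcast]; exact he12.1.1)
      rw [hlen] at this
      exact this
    have hraw2 : pvGetLL acc1 e.2 = pvGetLL acc1 w2 := by
      unfold pvGetLL
      have := pv_getD_wrap acc1 e.2 ([] : List Int) (by rw [hlen1, hcast]; exact he12.2.1)
      rw [hlen1] at this
      exact this
    have hmem : ∀ x y, 0 ≤ x → x < n →
        (y ∈ pvGetLL acc2 x ↔ (P x y ∨ ((w1 = x ∧ e.2 = y) ∨ (w2 = x ∧ e.1 = y)))) := by
      intro x y hx0 hxn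
      rw [hget2 x hx0]
      by_cases hA : x = w2
      · subst hA
        rw [if_pos rfl, hraw2, hget1 w2 hw2.1]
        by_cases hB : w2 = w1
        · rw [if_pos hB, hraw1]
          have hPiff := hP w1 y hw1.1 hw1.2
          simp only [List.mem_append, List.mem_singleton, hPiff]
          constructor
          · rintro ((h | h) | h)
            · exact Or.inl (by rw [hB]; exact h)
            · exact Or.inr (Or.inl ⟨hB.symm, h.symm⟩)
            · exact Or.inr (Or.inr (by simp [h]))
          · rintro (h | (⟨h1, h2⟩ | ⟨h1, h2⟩))
            · exact Or.inl (Or.inl (by rw [← hB]; exact h))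
            · exact Or.inl (Or.inr h2.symm)
            · exact Or.inr h2.symm
        · rw [if_neg hB]
          have hPiff := hP w2 y hw2.1 hw2.2
          simp only [List.mem_append, List.mem_singleton, hPiff]
          constructor
          · rintro (h | h)
            · exact Or.inl h
            · exact Or.inr (Or.inr (by simp [h]))
          · rintro (h | (⟨h1, h2⟩ | ⟨h1, h2⟩))
            · exact Or.inl h
            · exact absurd h1.symm hB
            · exact Or.inr h2.symm
      · rw [if_neg hA, hget1 x hx0]
        by_cases hB : x = w1
        · subst hB
          rw [if_pos rfl, hraw1]
          have hPiff := hP w1 y hw1.1 hw1.2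
          simp only [List.mem_append, List.mem_singleton, hPiff]
          constructor
          · rintro (h | h)
            · exact Or.inl h
            · exact Or.inr (Or.inl (by simp [h]))
          · rintro (h | (⟨h1, h2⟩ | ⟨h1, h2⟩))
            · exact Or.inl h
            · exact Or.inr h2.symm
            · exact absurd h1.symm hA
        · rw [if_neg hB]
          rw [hP x y hx0 hxn]
          constructor
          · exact Or.inl
          · rintro (h | (⟨h1, h2⟩ | ⟨h1, h2⟩))
            · exact h
            · exact absurd h1.symm hB
            · exact absurd h1.symm hA
    simp only [List.foldl_cons]
    have := ih acc2 (fun x y => P x y ∨ ((w1 = x ∧ e.2 = y) ∨ (w2 = x ∧ e.1 = y)))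
      hlen2 (fun e' he' => hE e' (by simp [he'])) hmem
    refine ⟨this.1, fun x y hx0 hxn => ?_⟩
    rw [this.2 x y hx0 hxn, pvAdjS_cons]
    tauto

theorem pvBuildSucc_spec (n : Int) (edges : List (Int × Int))
    (hE : ∀ e ∈ edges, pvInW n e.1 ∧ pvInW n e.2) :
    (pvBuildSucc n edges).length = n.toNat ∧
    ∀ x y, 0 ≤ x → x < n → (y ∈ pvGetLL (pvBuildSucc n edges) x ↔ pvAdjS n edges x y) := by
  have hlen : ((PySem.List.pyRange 0 n 1).map (fun _ => ([] : List Int))).length = n.toNat := by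
    simp [PySem.List.pyRange]; omega
  have hinit : ∀ x y : Int, 0 ≤ x → x < n →
      (y ∈ pvGetLL ((PySem.List.pyRange 0 n 1).map (fun _ => ([] : List Int))) x ↔ False) := by
    intro x y _ _
    simp only [iff_false]
    intro hmem
    unfold pvGetLL at hmem
    by_cases h : PySem.List.pyGet? ((PySem.List.pyRange 0 n 1).map (fun _ => ([] : List Int))) x = none
    · rw [PySem.List.pyGetD_of_none _ _ _ h] at hmem; simp at hmem
    · obtain ⟨b, hb⟩ := Option.ne_none_iff_exists'.mp h
      have hmemb := PySem.List.mem_of_pyGet?_eq_some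
        (xs := (PySem.List.pyRange 0 n 1).map (fun _ => ([] : List Int))) hb
      have hbnil : b = [] := (by simpa using hmemb : 0 < n ∧ b = []).2
      rw [PySem.List.pyGetD, hb] at hmem
      rw [hbnil] at hmem
      simp at hmem
  obtain ⟨h1, h2⟩ := pvBuild_aux n edges ((PySem.List.pyRange 0 n 1).map (fun _ => ([] : List Int)))
    (fun _ _ => False) hlen hE hinit
  unfold pvBuildSucc
  refine ⟨h1, fun x y hx0 hxn => ?_⟩
  rw [h2 x y hx0 hxn]
  simp

-- ===== DFS loop =====

-- the body of the inner 'for neighboor in successors[current]' loop, named for the proofs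
def pvStep (st : List Bool × List Int) (nb : Int) : List Bool × List Int :=
  if pvGetB st.1 nb = false then (PySem.List.pySetD st.1 nb true, st.2 ++ [nb]) else st

theorem pvStep_eq (nbrs : List Int) (v : List Bool) (st : List Int) :
    nbrs.foldl (fun (st : List Bool × List Int) nb =>
        if pvGetB st.1 nb = false then
          (PySem.List.pySetD st.1 nb true, st.2 ++ [nb])
        else st) (v, st) = nbrs.foldl pvStep (v, st) := rfl

theorem pvDfs_fold (n : Int) : ∀ (nbrs : List Int) (v : List Bool) (st : List Int),
    v.length = n.toNat → (∀ y ∈ nbrs, pvInW n y) →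
    (nbrs.foldl pvStep (v, st)).1.length = n.toNat
    ∧ (∀ k, 0 ≤ k → pvGetB v k = true → pvGetB (nbrs.foldl pvStep (v, st)).1 k = true)
    ∧ (∀ k, 0 ≤ k → pvGetB (nbrs.foldl pvStep (v, st)).1 k = true →
        pvGetB v k = true ∨ ∃ y ∈ nbrs, pvW n.toNat y = k)
    ∧ (∃ tail, (nbrs.foldl pvStep (v, st)).2 = st ++ tail ∧ ∀ x ∈ tail, x ∈ nbrs)
    ∧ (∀ y ∈ nbrs, pvGetB (nbrs.foldl pvStep (v, st)).1 (pvW n.toNat y) = true)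
    ∧ (∀ k, 0 ≤ k → pvGetB (nbrs.foldl pvStep (v, st)).1 k = true →
        pvGetB v k = true ∨ ∃ x ∈ (nbrs.foldl pvStep (v, st)).2, pvW n.toNat x = k)
    ∧ 2 * (nbrs.foldl pvStep (v, st)).1.count false + (nbrs.foldl pvStep (v, st)).2.length ≤
        2 * v.count false + st.length := by
  intro nbrs
  induction nbrs with
  | nil =>
    intro v st hlen _
    simp only [List.foldl_nil]
    exact ⟨hlen, fun k _ h => h, fun k _ h => Or.inl h, ⟨[], by simp⟩,
      by simp, fun k _ h => Or.inl h, by omega⟩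
  | cons y nbrs ih =>
    intro v st hlen hr
    have hy : pvInW n y := hr y (by simp)
    have hn : 0 < n := by rcases hy with ⟨h1, h2⟩; omega
    have hcast : ((n.toNat : Int)) = n := by omega
    have hwy := pvW_range n y hy
    have hylo : -(v.length : Int) ≤ y := by rw [hlen]; rcases hy with ⟨h1, h2⟩; omega
    have hyhi : y < (v.length : Int) := by rw [hlen]; rcases hy with ⟨h1, h2⟩; omega
    have hwyv : pvW v.length y = pvW n.toNat y := by rw [hlen]
    have hrest : ∀ z ∈ nbrs, pvInW n z := fun z hz => hr z (by simp [hz])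
    have hread : pvGetB v y = pvGetB v (pvW n.toNat y) := by
      unfold pvGetB
      rw [pv_getD_wrap v y false hylo, hwyv]
    simp only [List.foldl_cons]
    by_cases hvy : pvGetB v y = false
    · rw [show pvStep (v, st) y = (PySem.List.pySetD v y true, st ++ [y]) from by
        simp [pvStep, hvy]]
      have hlen1 : (PySem.List.pySetD v y true).length = n.toNat := by
        rw [pv_length_setD]; exact hlen
      have hget1 : ∀ k : Int, 0 ≤ k →
          pvGetB (PySem.List.pySetD v y true) k =
            if k = pvW n.toNat y then true else pvGetB v k := by
        intro k hk
        unfold pvGetB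
        rw [pv_getD_setD_w v y k true false hylo hyhi hk, hwyv]
      obtain ⟨L, M, S, ⟨tail, ht, htm⟩, F, X, C⟩ := ih (PySem.List.pySetD v y true) (st ++ [y])
        hlen1 hrest
      refine ⟨L, ?_, ?_, ?_, ?_, ?_, ?_⟩
      · intro k hk h
        exact M k hk (by rw [hget1 k hk]; split_ifs <;> simp [h])
      · intro k hk h
        rcases S k hk h with h' | ⟨z, hz, hzk⟩
        · rw [hget1 k hk] at h'
          by_cases hky : k = pvW n.toNat y
          · exact Or.inr ⟨y, by simp, hky.symm⟩
          · rw [if_neg hky] at h'; exact Or.inl h'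
        · exact Or.inr ⟨z, by simp [hz], hzk⟩
      · refine ⟨y :: tail, by simpa using ht, ?_⟩
        intro x hx
        rcases List.mem_cons.mp hx with h | h
        · simp [h]
        · simp [htm x h]
      · intro z hz
        rcases List.mem_cons.mp hz with h | h
        · subst h
          exact M (pvW n.toNat z) hwy.1 (by rw [hget1 _ hwy.1]; simp)
        · exact F z h
      · intro k hk h
        rcases X k hk h with h' | h'
        · rw [hget1 k hk] at h'
          by_cases hky : k = pvW n.toNat y
          · refine Or.inr ⟨y, ?_, hky.symm⟩
            rw [ht]; simp
          · rw [if_neg hky] at h'; exact Or.inl h'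
        · exact Or.inr h'
      · have hvyw : pvGetB v (pvW n.toNat y) = false := by rw [← hread]; exact hvy
        have hcnt := pv_count_setD v (pvW n.toNat y)
          hwy.1 (by rw [hlen, hcast]; exact hwy.2) hvyw
        rw [pv_setD_wrap v y true hylo, hwyv] at C
        simp only [List.length_append, List.length_cons, List.length_nil] at C ⊢
        rw [pv_setD_wrap v y true hylo, hwyv]
        omega
    · rw [show pvStep (v, st) y = (v, st) from by simp [pvStep, hvy]]
      obtain ⟨L, M, S, ⟨tail, ht, htm⟩, F, X, C⟩ := ih v st hlen hrest
      refine ⟨L, M, ?_, ⟨tail, ht, fun x hx => by simp [htm x hx]⟩, ?_, X, C⟩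
      · intro k hk h
        rcases S k hk h with h' | ⟨z, hz, hzk⟩
        · exact Or.inl h'
        · exact Or.inr ⟨z, by simp [hz], hzk⟩
      · intro z hz
        rcases List.mem_cons.mp hz with h | h
        · subst h
          have : pvGetB v (pvW n.toNat z) = true := by
            rw [← hread]
            exact Bool.not_eq_false _ |>.mp hvy
          exact M (pvW n.toNat z) hwy.1 this
        · exact F z h

theorem pvDfs_main (n s : Int) (edges : List (Int × Int)) (succ : List (List Int))
    (hE : ∀ e ∈ edges, pvInW n e.1 ∧ pvInW n e.2)
    (hS : ∀ x y, 0 ≤ x → x < n → (y ∈ pvGetLL succ x ↔ pvAdjS n edges x y))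
    (hsucclen : succ.length = n.toNat) :
    ∀ (fuel : Nat) (v : List Bool) (stack : List Int),
    v.length = n.toNat →
    (∀ x ∈ stack, pvInW n x ∧ pvGetB v (pvW n.toNat x) = true) →
    (∀ k, 0 ≤ k → pvGetB v k = true → pvReachW n edges s k ∧ k < n) →
    (∀ k, 0 ≤ k → pvGetB v k = true →
        (∀ l, pvAdjW n edges k l → pvGetB v l = true) ∨ ∃ x ∈ stack, pvW n.toNat x = k) →
    2 * v.count false + stack.length ≤ fuel →
    (∀ k, 0 ≤ k → pvGetB v k = true → pvGetB (pvDfs succ v stack fuel) k = true)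
    ∧ (∀ k, 0 ≤ k → pvGetB (pvDfs succ v stack fuel) k = true → pvReachW n edges s k)
    ∧ (∀ k l, 0 ≤ k → pvGetB (pvDfs succ v stack fuel) k = true → pvAdjW n edges k l →
        pvGetB (pvDfs succ v stack fuel) l = true) := by
  intro fuel
  induction fuel with
  | zero =>
    intro v stack hlen hstack hI2 hI4 hfuel
    have hempty : stack = [] := List.length_eq_zero_iff.mp (by omega : stack.length = 0)
    simp only [pvDfs]
    refine ⟨fun k _ h => h, fun k hk h => (hI2 k hk h).1, fun k l hk h hadj => ?_⟩
    rcases hI4 k hk h with hcl | ⟨x, hx, _⟩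
    · exact hcl l hadj
    · rw [hempty] at hx; simp at hx
  | succ fuel ih =>
    intro v stack hlen hstack hI2 hI4 hfuel
    cases hlast : stack.getLast? with
    | none =>
      have hempty : stack = [] := List.getLast?_eq_none_iff.mp hlast
      subst hempty
      simp only [pvDfs, List.getLast?_nil]
      refine ⟨fun k _ h => h, fun k hk h => (hI2 k hk h).1, fun k l hk h hadj => ?_⟩
      rcases hI4 k hk h with hcl | ⟨x, hx, _⟩
      · exact hcl l hadj
      · simp at hx
    | some current =>
      have hne : stack ≠ [] := by
        intro h; rw [h] at hlast; simp at hlast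
      have hcur_mem : current ∈ stack := List.mem_of_getLast? hlast
      obtain ⟨hcurW, hcurv⟩ := hstack current hcur_mem
      have hn : 0 < n := by rcases hcurW with ⟨h1, h2⟩; omega
      have hcast : ((n.toNat : Int)) = n := by omega
      have hkc := pvW_range n current hcurW
      obtain ⟨hcurR, _⟩ := hI2 (pvW n.toNat current) hkc.1 hcurv
      have hsuccwrap : pvGetLL succ current = pvGetLL succ (pvW n.toNat current) := by
        unfold pvGetLL
        have := pv_getD_wrap succ current ([] : List Int)
          (by rw [hsucclen, hcast]; rcases hcurW with ⟨h1, h2⟩; exact h1)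
        rw [hsucclen] at this
        exact this
      have hnadj : ∀ y, y ∈ pvGetLL succ current ↔ pvAdjS n edges (pvW n.toNat current) y := by
        intro y
        rw [hsuccwrap]
        exact hS (pvW n.toNat current) y hkc.1 hkc.2
      have hnrange : ∀ y ∈ pvGetLL succ current, pvInW n y := by
        intro y hy
        exact pvAdjS_range n edges hE ((hnadj y).mp hy)
      obtain ⟨L, M, S, ⟨tail, ht, htm⟩, F, X, C⟩ :=
        pvDfs_fold n (pvGetLL succ current) v stack.dropLast hlen hnrange
      have hstep : pvDfs succ v stack (fuel + 1) =
          pvDfs succ ((pvGetLL succ current).foldl pvStep (v, stack.dropLast)).1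
            ((pvGetLL succ current).foldl pvStep (v, stack.dropLast)).2 fuel := by
        conv_lhs => rw [pvDfs]
        rw [hlast, ← pvStep_eq]
      rw [hstep]
      have hsplit : stack.dropLast ++ [current] = stack := by
        have h1 := List.dropLast_concat_getLast hne
        have h2 : stack.getLast hne = current := by
          rw [List.getLast?_eq_some_getLast hne] at hlast
          exact Option.some_inj.mp hlast
        rw [h2] at h1
        exact h1
      have hstack' : ∀ x ∈ ((pvGetLL succ current).foldl pvStep (v, stack.dropLast)).2,
          pvInW n x ∧
          pvGetB ((pvGetLL succ current).foldl pvStep (v, stack.dropLast)).1 (pvW n.toNat x) = true := by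
        intro x hx
        rw [ht] at hx
        rcases List.mem_append.mp hx with h | h
        · have hmem : x ∈ stack := by
            rw [← hsplit]; exact List.mem_append.mpr (Or.inl h)
          obtain ⟨h1, h2⟩ := hstack x hmem
          exact ⟨h1, M (pvW n.toNat x) (pvW_range n x h1).1 h2⟩
        · have hx' := htm x h
          exact ⟨hnrange x hx', F x hx'⟩
      have hI2' : ∀ k, 0 ≤ k →
          pvGetB ((pvGetLL succ current).foldl pvStep (v, stack.dropLast)).1 k = true →
          pvReachW n edges s k ∧ k < n := by
        intro k hk h
        rcases S k hk h with h' | ⟨y, hy, hyk⟩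
        · exact hI2 k hk h'
        · have hadj := pvAdjS_to_W ((hnadj y).mp hy)
          rw [hyk] at hadj
          exact ⟨Relation.ReflTransGen.tail hcurR hadj,
            (pvAdjW_rangeL n edges hE hadj).2⟩
      have hI4' : ∀ k, 0 ≤ k →
          pvGetB ((pvGetLL succ current).foldl pvStep (v, stack.dropLast)).1 k = true →
          (∀ l, pvAdjW n edges k l →
            pvGetB ((pvGetLL succ current).foldl pvStep (v, stack.dropLast)).1 l = true) ∨
          ∃ x ∈ ((pvGetLL succ current).foldl pvStep (v, stack.dropLast)).2, pvW n.toNat x = k := by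
        intro k hk h
        rcases X k hk h with h' | h'
        · rcases hI4 k hk h' with hcl | ⟨x, hx, hxk⟩
          · refine Or.inl fun l hadj => ?_
            have hl0 : 0 ≤ l := (pvAdjW_rangeL n edges hE hadj).1
            exact M l hl0 (hcl l hadj)
          · have hsplit' : x ∈ stack.dropLast ∨ x = current := by
              rw [← hsplit] at hx
              rcases List.mem_append.mp hx with h'' | h''
              · exact Or.inl h''
              · exact Or.inr (by simpa using h'')
            rcases hsplit' with h'' | h''
            · refine Or.inr ⟨x, ?_, hxk⟩
              rw [ht]; exact List.mem_append.mpr (Or.inl h'')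
            · subst h''
              refine Or.inl fun l hadj => ?_
              rw [← hxk] at hadj
              obtain ⟨y, hyS, hyW⟩ := pvAdjW_to_S hadj
              rw [← hyW]
              exact F y ((hnadj y).mpr hyS)
        · exact Or.inr h'
      have hfuel' : 2 * ((pvGetLL succ current).foldl pvStep (v, stack.dropLast)).1.count false +
          ((pvGetLL succ current).foldl pvStep (v, stack.dropLast)).2.length ≤ fuel := by
        have hlstack : stack.dropLast.length = stack.length - 1 := by
          simp [List.length_dropLast]
        have hpos : 1 ≤ stack.length := by
          rcases stack with _ | _
          · exact absurd rfl hne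
          · simp
        omega
      obtain ⟨M2, S2, C2⟩ := ih ((pvGetLL succ current).foldl pvStep (v, stack.dropLast)).1
        ((pvGetLL succ current).foldl pvStep (v, stack.dropLast)).2 L hstack' hI2' hI4' hfuel'
      exact ⟨fun k hk h => M2 k hk (M k hk h), S2, C2⟩

-- ===== propagation loop (port B) =====

theorem pvPassB_spec (n s : Int) (edges : List (Int × Int))
    (hEall : ∀ e ∈ edges, pvInW n e.1 ∧ pvInW n e.2) :
    ∀ (es : List (Int × Int)) (c : List Bool) (ch : Bool),
    (∀ e ∈ es, e ∈ edges) → c.length = n.toNat →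
    (pvPassB es (c, ch)).1.length = n.toNat
    ∧ (∀ k, 0 ≤ k → pvGetB c k = true → pvGetB (pvPassB es (c, ch)).1 k = true)
    ∧ ((∀ k, 0 ≤ k → pvGetB c k = true → pvReachW n edges s k) →
        ∀ k, 0 ≤ k → pvGetB (pvPassB es (c, ch)).1 k = true → pvReachW n edges s k)
    ∧ ((pvPassB es (c, ch)).2 = false → (pvPassB es (c, ch)).1 = c ∧ ch = false ∧
        ∀ e ∈ es, pvGetB c e.1 = pvGetB c e.2)
    ∧ ((pvPassB es (c, ch)).2 = true → ch = true ∨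
        (pvPassB es (c, ch)).1.count false < c.count false)
    ∧ (pvPassB es (c, ch)).1.count false ≤ c.count false := by
  intro es
  induction es with
  | nil =>
    intro c ch _ hclen
    simp only [pvPassB, List.foldl_nil]
    exact ⟨hclen, fun k _ h => h, fun h k hk hh => h k hk hh,
      fun h => ⟨by simp, h, by simp⟩, fun h => Or.inl h, le_refl _⟩
  | cons e es ih =>
    intro c ch hsub hclen
    have he : e ∈ edges := hsub e (by simp)
    have hsub' : ∀ e' ∈ es, e' ∈ edges := fun e' h => hsub e' (by simp [h])
    have he12 := hEall e he
    have hn : 0 < n := by rcases he12.1 with ⟨h1, h2⟩; omega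
    have hcast : ((n.toNat : Int)) = n := by omega
    have hw1 := pvW_range n e.1 he12.1
    have hw2 := pvW_range n e.2 he12.2
    have h1lo : -(c.length : Int) ≤ e.1 := by rw [hclen, hcast]; exact he12.1.1
    have h1hi : e.1 < (c.length : Int) := by rw [hclen, hcast]; exact he12.1.2
    have h2lo : -(c.length : Int) ≤ e.2 := by rw [hclen, hcast]; exact he12.2.1
    have hread1 : pvGetB c e.1 = pvGetB c (pvW n.toNat e.1) := by
      unfold pvGetB
      rw [pv_getD_wrap c e.1 false h1lo, hclen]
    have hread2 : pvGetB c e.2 = pvGetB c (pvW n.toNat e.2) := by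
      unfold pvGetB
      rw [pv_getD_wrap c e.2 false h2lo, hclen]
    by_cases hcond : (pvGetB c e.1 != pvGetB c e.2) = true
    · have hred : pvPassB (e :: es) (c, ch) =
          pvPassB es (PySem.List.pySetD (PySem.List.pySetD c e.1 true) e.2 true, true) := by
        simp only [pvPassB, List.foldl_cons]
        rw [if_pos hcond]
      rw [hred]
      set c1 := PySem.List.pySetD (PySem.List.pySetD c e.1 true) e.2 true with hc1
      have hlen1 : c1.length = n.toNat := by
        rw [hc1, pv_length_setD, pv_length_setD]; exact hclen
      have hget1 : ∀ k : Int, 0 ≤ k →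
          pvGetB c1 k = if k = pvW n.toNat e.2 then true else
            (if k = pvW n.toNat e.1 then true else pvGetB c k) := by
        intro k hk
        unfold pvGetB
        rw [hc1]
        rw [pv_getD_setD_w (PySem.List.pySetD c e.1 true) e.2 k true false
          (by rw [pv_length_setD]; exact h2lo)
          (by rw [pv_length_setD, hclen, hcast]; exact he12.2.2) hk]
        rw [pv_length_setD, hclen]
        rw [pv_getD_setD_w c e.1 k true false h1lo h1hi hk, hclen]
      have hxor : (pvGetB c (pvW n.toNat e.1) = true ∧ pvGetB c (pvW n.toNat e.2) = false) ∨
          (pvGetB c (pvW n.toNat e.1) = false ∧ pvGetB c (pvW n.toNat e.2) = true) := by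
        rw [hread1, hread2] at hcond
        rcases hh1 : pvGetB c (pvW n.toNat e.1) with _ | _ <;>
          rcases hh2 : pvGetB c (pvW n.toNat e.2) with _ | _ <;>
          rw [hh1, hh2] at hcond <;> simp_all
      have hcnt1 : c1.count false < c.count false := by
        have hle : c1.count false ≤ (PySem.List.pySetD c e.1 true).count false := by
          rw [hc1]; exact pv_count_setD_le _ _
        rcases hxor with ⟨ht1, hf2⟩ | ⟨hf1, ht2⟩
        · -- slot of e.2 is false: flipping it in the second write is the strict drop
          have hmid : (PySem.List.pySetD c e.1 true).count false = c.count false := by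
            rw [pv_setD_wrap c e.1 true h1lo, hclen, PySem.List.pySetD_of_nonneg _ _ hw1.1]
            apply pv_count_set_true c (pvW n.toNat e.1).toNat (by omega)
            have := PySem.List.pyGetD_eq_getElem c false hw1.1 (by omega)
            unfold pvGetB at ht1
            rw [this] at ht1
            exact ht1
          have hmid2 : pvGetB (PySem.List.pySetD c e.1 true) (pvW n.toNat e.2) = false := by
            unfold pvGetB
            rw [pv_getD_setD_w c e.1 (pvW n.toNat e.2) true false h1lo h1hi hw2.1, hclen]
            rw [if_neg]
            · exact hf2
            · intro hEq
              rw [hEq] at hf2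
              rw [ht1] at hf2
              exact Bool.true_eq_false.mp hf2
          have : c1.count false + 1 = (PySem.List.pySetD c e.1 true).count false := by
            rw [hc1, pv_setD_wrap _ e.2 true (by rw [pv_length_setD]; exact h2lo),
              pv_length_setD, hclen]
            exact pv_count_setD _ (pvW n.toNat e.2) hw2.1
              (by rw [pv_length_setD, hclen, hcast]; exact hw2.2)
              (by
                unfold pvGetB
                unfold pvGetB at hmid2
                rw [pv_getD_wrap _ (pvW n.toNat e.2) false
                  (by rw [pv_length_setD, hclen]; omega)] at hmid2
                rw [pv_length_setD, hclen] at hmid2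
                rw [show pvW n.toNat (pvW n.toNat e.2) = pvW n.toNat e.2 from by
                  unfold pvW; split <;> omega] at hmid2
                exact hmid2)
          omega
        · -- slot of e.1 is false: the first write is the strict drop
          have hmid : (PySem.List.pySetD c e.1 true).count false + 1 = c.count false := by
            rw [pv_setD_wrap c e.1 true h1lo, hclen]
            exact pv_count_setD c (pvW n.toNat e.1) hw1.1 (by rw [hclen, hcast]; exact hw1.2) hf1
          omega
      obtain ⟨L, M, SND, FIX, GROW, CNT⟩ := ih c1 true hsub' hlen1
      refine ⟨L, ?_, ?_, ?_, ?_, ?_⟩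
      · intro k hk h
        refine M k hk ?_
        rw [hget1 k hk]
        split_ifs <;> simp [h]
      · intro hsound k hk h
        refine SND ?_ k hk h
        intro k' hk' h'
        rw [hget1 k' hk'] at h'
        by_cases hA : k' = pvW n.toNat e.2
        · subst hA
          rcases hxor with ⟨ht1, _⟩ | ⟨_, ht2⟩
          · exact Relation.ReflTransGen.tail (hsound _ hw1.1 ht1)
              ⟨e, he, Or.inl ⟨rfl, rfl⟩⟩
          · exact hsound _ hw2.1 ht2
        · rw [if_neg hA] at h'
          by_cases hB : k' = pvW n.toNat e.1
          · subst hB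
            rcases hxor with ⟨ht1, _⟩ | ⟨_, ht2⟩
            · exact hsound _ hw1.1 ht1
            · exact Relation.ReflTransGen.tail (hsound _ hw2.1 ht2)
                ⟨e, he, Or.inr ⟨rfl, rfl⟩⟩
          · rw [if_neg hB] at h'
            exact hsound k' hk' h'
      · intro h
        obtain ⟨_, hfalse, _⟩ := FIX h
        exact absurd hfalse (by simp)
      · intro _
        refine Or.inr ?_
        calc (pvPassB es (c1, true)).1.count false ≤ c1.count false := CNT
          _ < c.count false := hcnt1
      · exact le_trans CNT (le_of_lt hcnt1)
    · have hred : pvPassB (e :: es) (c, ch) = pvPassB es (c, ch) := by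
        simp only [pvPassB, List.foldl_cons]
        rw [if_neg hcond]
      rw [hred]
      have heq : pvGetB c e.1 = pvGetB c e.2 := by
        rcases hh1 : pvGetB c e.1 with _ | _ <;> rcases hh2 : pvGetB c e.2 with _ | _ <;>
          rw [hh1, hh2] at hcond <;> simp_all
      obtain ⟨L, M, SND, FIX, GROW, CNT⟩ := ih c ch hsub' hclen
      refine ⟨L, M, SND, ?_, GROW, CNT⟩
      intro h
      obtain ⟨h1, h2, h3⟩ := FIX h
      refine ⟨h1, h2, ?_⟩
      intro e' he'
      rcases List.mem_cons.mp he' with h' | h'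
      · subst h'; exact heq
      · exact h3 e' h'

theorem pvSatB_spec (n s : Int) (edges : List (Int × Int))
    (hEall : ∀ e ∈ edges, pvInW n e.1 ∧ pvInW n e.2)
    (hsW : 0 ≤ pvW n.toNat s) :
    ∀ (fuel : Nat) (c : List Bool),
    c.length = n.toNat →
    pvGetB c (pvW n.toNat s) = true →
    (∀ k, 0 ≤ k → pvGetB c k = true → pvReachW n edges s k) →
    c.count false + 1 ≤ fuel →
    (pvSatB edges c fuel).length = n.toNat
    ∧ pvGetB (pvSatB edges c fuel) (pvW n.toNat s) = true
    ∧ (∀ k, 0 ≤ k → pvGetB (pvSatB edges c fuel) k = true → pvReachW n edges s k)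
    ∧ (∀ e ∈ edges, pvGetB (pvSatB edges c fuel) e.1 = pvGetB (pvSatB edges c fuel) e.2) := by
  intro fuel
  induction fuel with
  | zero =>
    intro c _ _ _ hfuel
    omega
  | succ fuel ih =>
    intro c hclen hseed hsound hfuel
    obtain ⟨L, M, SND, FIX, GROW, CNT⟩ :=
      pvPassB_spec n s edges hEall edges c false (fun e h => h) hclen
    by_cases hch : (pvPassB edges (c, false)).2 = true
    · have hred : pvSatB edges c (fuel + 1) = pvSatB edges (pvPassB edges (c, false)).1 fuel := by
        simp only [pvSatB]
        rw [if_pos hch]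
      rw [hred]
      have hdrop : (pvPassB edges (c, false)).1.count false < c.count false := by
        rcases GROW hch with h | h
        · exact absurd h (by simp)
        · exact h
      exact ih (pvPassB edges (c, false)).1 L (M _ hsW hseed) (SND hsound) (by omega)
    · have hred : pvSatB edges c (fuel + 1) = (pvPassB edges (c, false)).1 := by
        simp only [pvSatB]
        rw [if_neg hch]
      obtain ⟨hc, _, hcl⟩ := FIX (by simpa using hch)
      rw [hred, hc]
      exact ⟨hclen, hseed, hsound, hcl⟩

theorem is_edge_connected_spec_aux (n s : Int) (edges : List (Int × Int)) (R : List Bool)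
    (hlenR : R.length = n.toNat)
    (hE : ∀ e ∈ edges, pvInW n e.1 ∧ pvInW n e.2)
    (hn : 0 < n)
    (hseed : pvGetB R (pvW n.toNat s) = true)
    (hclosed : ∀ e ∈ edges, pvGetB R e.1 = pvGetB R e.2) :
    ∀ k, pvReachW n edges s k → pvGetB R k = true := by
  intro k h
  induction h with
  | refl => exact hseed
  | @tail b c _ hadj ih =>
    have hcast : ((n.toNat : Int)) = n := by omega
    obtain ⟨e, he, hc | hc⟩ := hadj
    · have hw : pvGetB R e.1 = pvGetB R (pvW n.toNat e.1) := by
        unfold pvGetB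
        rw [pv_getD_wrap R e.1 false (by rw [hlenR, hcast]; exact (hE e he).1.1), hlenR]
      have hw2 : pvGetB R e.2 = pvGetB R (pvW n.toNat e.2) := by
        unfold pvGetB
        rw [pv_getD_wrap R e.2 false (by rw [hlenR, hcast]; exact (hE e he).2.1), hlenR]
      rw [← hc.2, ← hw2, ← hclosed e he, hw, hc.1]
      exact ih
    · have hw : pvGetB R e.2 = pvGetB R (pvW n.toNat e.2) := by
        unfold pvGetB
        rw [pv_getD_wrap R e.2 false (by rw [hlenR, hcast]; exact (hE e he).2.1), hlenR]
      have hw1 : pvGetB R e.1 = pvGetB R (pvW n.toNat e.1) := by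
        unfold pvGetB
        rw [pv_getD_wrap R e.1 false (by rw [hlenR, hcast]; exact (hE e he).1.1), hlenR]
      rw [← hc.2, ← hw1, hclosed e he, hw, hc.1]
      exact ih

-- ===== VERDICT (by name: the statement is the Claim_ definition above) =====
theorem is_edge_connected_spec : Claim_equal_is_edge_connected := by
  intro n edges _ hpre
  unfold Spec_is_edge_connected
  obtain ⟨hne, hE'⟩ := hpre
  have hE : ∀ e ∈ edges, pvInW n e.1 ∧ pvInW n e.2 := by
    intro e he
    obtain ⟨h1, h2, h3, h4⟩ := hE' e he
    exact ⟨⟨h1, h2⟩, ⟨h3, h4⟩⟩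
  obtain ⟨e0, rest, rfl⟩ : ∃ e0 rest, edges = e0 :: rest := by
    cases edges with
    | nil => exact absurd rfl hne
    | cons a l => exact ⟨a, l, rfl⟩
  have he0 : pvInW n e0.1 ∧ pvInW n e0.2 := hE e0 (by simp)
  have hn : 0 < n := by rcases he0.1 with ⟨h1, h2⟩; omega
  have hcast : ((n.toNat : Int)) = n := by omega
  have hw0 := pvW_range n e0.1 he0.1
  have h0 : PySem.List.pyGet? (e0 :: rest) 0 = some e0 := PySem.List.pyGet?_zero_cons e0 rest
  have hvlen : (PySem.List.pySetD (List.replicate n.toNat false) e0.1 true).length = n.toNat := by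
    rw [pv_length_setD, List.length_replicate]
  have hv0 : ∀ k : Int, 0 ≤ k →
      (pvGetB (PySem.List.pySetD (List.replicate n.toNat false) e0.1 true) k = true ↔
        k = pvW n.toNat e0.1) := by
    intro k hk
    unfold pvGetB
    rw [pv_getD_setD_w (List.replicate n.toNat false) e0.1 k true false
      (by rw [List.length_replicate, hcast]; exact he0.1.1)
      (by rw [List.length_replicate, hcast]; exact he0.1.2) hk]
    rw [List.length_replicate]
    split_ifs with h
    · simp [h]
    · rw [show PySem.List.pyGetD (List.replicate n.toNat false) k false = false from
        pvGetB_replicate n.toNat k]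
      simp [h]
  -- A side
  obtain ⟨hblen, hbmem⟩ := pvBuildSucc_spec n (e0 :: rest) hE
  obtain ⟨M, SND, CL⟩ := pvDfs_main n e0.1 (e0 :: rest) (pvBuildSucc n (e0 :: rest)) hE hbmem hblen
    (2 * n.toNat + 2)
    (PySem.List.pySetD (List.replicate n.toNat false) e0.1 true) [e0.1]
    hvlen
    (by
      intro x hx
      rcases List.mem_singleton.mp hx with rfl
      exact ⟨he0.1, (hv0 _ hw0.1).mpr rfl⟩)
    (by
      intro k hk h
      rcases (hv0 k hk).mp h with rfl
      exact ⟨Relation.ReflTransGen.refl, hw0.2⟩)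
    (by
      intro k hk h
      rcases (hv0 k hk).mp h with rfl
      exact Or.inr ⟨e0.1, by simp, rfl⟩)
    (by
      have := List.count_le_length
        (l := PySem.List.pySetD (List.replicate n.toNat false) e0.1 true) (a := false)
      rw [hvlen] at this
      simp only [List.length_singleton]
      omega)
  have hR : ∀ k : Int, 0 ≤ k →
      (pvGetB (pvDfs (pvBuildSucc n (e0 :: rest))
          (PySem.List.pySetD (List.replicate n.toNat false) e0.1 true) [e0.1]
          (2 * n.toNat + 2)) k = true ↔ pvReachW n (e0 :: rest) e0.1 k) := by
    have hrev : ∀ k : Int, pvReachW n (e0 :: rest) e0.1 k →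
        pvGetB (pvDfs (pvBuildSucc n (e0 :: rest))
          (PySem.List.pySetD (List.replicate n.toNat false) e0.1 true) [e0.1]
          (2 * n.toNat + 2)) k = true := by
      intro k h
      induction h with
      | refl => exact M _ hw0.1 ((hv0 _ hw0.1).mpr rfl)
      | @tail b c _ hadj ih =>
        have hb0 : 0 ≤ b := (pvAdjW_rangeL n (e0 :: rest) hE (pvAdjW_symm hadj)).1
        exact CL b c hb0 ih hadj
    exact fun k hk => ⟨SND k hk, hrev k⟩
  -- B side
  obtain ⟨hlenC, hseedC, hsoundC, hclosedC⟩ := pvSatB_spec n e0.1 (e0 :: rest) hE hw0.1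
    (n.toNat + 2)
    (PySem.List.pySetD (List.replicate n.toNat false) e0.1 true)
    hvlen
    ((hv0 _ hw0.1).mpr rfl)
    (by
      intro k hk h
      rcases (hv0 k hk).mp h with rfl
      exact Relation.ReflTransGen.refl)
    (by
      have := List.count_le_length
        (l := PySem.List.pySetD (List.replicate n.toNat false) e0.1 true) (a := false)
      rw [hvlen] at this
      omega)
  have hCrev := is_edge_connected_spec_aux n e0.1 (e0 :: rest)
    (pvSatB (e0 :: rest) (PySem.List.pySetD (List.replicate n.toNat false) e0.1 true) (n.toNat + 2))
    hlenC hE hn hseedC hclosedC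
  have hC : ∀ k : Int, 0 ≤ k →
      (pvGetB (pvSatB (e0 :: rest)
          (PySem.List.pySetD (List.replicate n.toNat false) e0.1 true) (n.toNat + 2)) k = true ↔
        pvReachW n (e0 :: rest) e0.1 k) :=
    fun k hk => ⟨hsoundC k hk, hCrev k⟩
  have hCwrap : ∀ x : Int, pvInW n x →
      pvGetB (pvSatB (e0 :: rest)
          (PySem.List.pySetD (List.replicate n.toNat false) e0.1 true) (n.toNat + 2)) x =
      pvGetB (pvSatB (e0 :: rest)
          (PySem.List.pySetD (List.replicate n.toNat false) e0.1 true) (n.toNat + 2))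
        (pvW n.toNat x) := by
    intro x hx
    unfold pvGetB
    rw [pv_getD_wrap _ x false (by rw [hlenC, hcast]; exact hx.1), hlenC]
  -- assemble
  simp only [is_edge_connected, is_edge_connected_alt, h0]
  rw [Bool.eq_iff_iff, List.all_eq_true, List.all_eq_true]
  constructor
  · intro hA e he
    have heR := hE e he
    have key : ∀ k : Int, 0 ≤ k → k < n → pvTouchW n (e0 :: rest) k →
        pvReachW n (e0 :: rest) e0.1 k := by
      intro k hk hkn htouch
      have hkmem : k ∈ PySem.List.pyRange 0 n 1 := by
        rw [PySem.List.mem_pyRange_one]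
        constructor <;> omega
      have := hA k hkmem
      rw [Bool.or_eq_true] at this
      rcases this with h | h
      · exact (hR k hk).mp h
      · exfalso
        rw [decide_eq_true_iff] at h
        obtain ⟨y, hy⟩ := (pvTouchW_iff_adjS n _ k).mp htouch
        have : y ∈ pvGetLL (pvBuildSucc n (e0 :: rest)) k := (hbmem k y hk hkn).mpr hy
        rw [h] at this
        simp at this
    have hw1 := pvW_range n e.1 heR.1
    have hw2 := pvW_range n e.2 heR.2
    rw [Bool.and_eq_true, hCwrap e.1 heR.1, hCwrap e.2 heR.2]
    constructor
    · exact (hC _ hw1.1).mpr (key _ hw1.1 hw1.2 ⟨e, he, Or.inl rfl⟩)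
    · exact (hC _ hw2.1).mpr (key _ hw2.1 hw2.2 ⟨e, he, Or.inr rfl⟩)
  · intro hB k hk
    have hk' : 0 ≤ k ∧ k < n := by
      rw [PySem.List.mem_pyRange_one] at hk
      constructor <;> omega
    rw [Bool.or_eq_true]
    by_cases htouch : pvTouchW n (e0 :: rest) k
    · obtain ⟨e, he, hcase⟩ := htouch
      have heR := hE e he
      have := hB e he
      rw [Bool.and_eq_true, hCwrap e.1 heR.1, hCwrap e.2 heR.2] at this
      obtain ⟨hb1, hb2⟩ := this
      refine Or.inl ((hR k hk'.1).mpr ?_)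
      rcases hcase with h | h
      · exact h ▸ (hC _ (pvW_range n e.1 heR.1).1).mp hb1
      · exact h ▸ (hC _ (pvW_range n e.2 heR.2).1).mp hb2
    · refine Or.inr (decide_eq_true_iff.mpr ?_)
      rw [List.eq_nil_iff_forall_not_mem]
      intro y hy
      exact htouch ((pvTouchW_iff_adjS n _ k).mpr ⟨y, (hbmem k y hk'.1 hk'.2).mp hy⟩)
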